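-- pv_equiv track=rewrite | github.com/FernE047/pythonscript | maths/collatzWazoo/estruturas.py | get_greatest_2_and_3_factors
-- ===== SOURCE A (Python) =====
-- def get_greatest_2_and_3_factors(input_values: list[int]) -> int:
--     absolute_values: list[int] = []
--     for elemento in input_values:
--         if elemento < 0:
--             absolute_values.append(-elemento)
--         elif elemento > 0:
--             absolute_values.append(elemento)
--     two_factor_exponent = 0
--     three_factor_exponent = 0
--     while True:
--         is_divisible = False
--         for elemento in absolute_values:
--             if elemento % (2**two_factor_exponent) != 0:
--                 is_divisible = True
--         if is_divisible:
--             two_factor_exponent -= 1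
--             break
--         two_factor_exponent += 1
--     while True:
--         is_divisible = False
--         for elemento in absolute_values:
--             if elemento % (3**three_factor_exponent) != 0:
--                 is_divisible = True
--         if is_divisible:
--             three_factor_exponent -= 1
--             break
--         three_factor_exponent += 1
--     return (2**two_factor_exponent) * (3**three_factor_exponent)
-- ===== SOURCE B (Python) =====
-- def _val(p, a):
--     v = 0
--     while a % p == 0:
--         a //= p
--         v += 1
--     return v
--
--
-- def get_greatest_2_and_3_factors(input_values: list[int]) -> int:
--     e2 = None
--     e3 = None
--     for x in input_values:
--         if x != 0:
--             a = abs(x)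
--             v2 = _val(2, a)
--             v3 = _val(3, a)
--             if e2 is None or v2 < e2:
--                 e2 = v2
--             if e3 is None or v3 < e3:
--                 e3 = v3
--     return 2 ** e2 * 3 ** e3
-- ===== Notes on version B (the rewrite author's own statement) =====
-- stated objective: alternative
-- what changed: Instead of guessing exponents and re-scanning the whole list with a growing power-of-p modulus until a division fails (A), B makes one pass computing each nonzero element's 2-adic and 3-adic valuation and keeps the running minima; it trades A's repeated whole-list scans for per-element valuation loops.
import Mathlib
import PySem

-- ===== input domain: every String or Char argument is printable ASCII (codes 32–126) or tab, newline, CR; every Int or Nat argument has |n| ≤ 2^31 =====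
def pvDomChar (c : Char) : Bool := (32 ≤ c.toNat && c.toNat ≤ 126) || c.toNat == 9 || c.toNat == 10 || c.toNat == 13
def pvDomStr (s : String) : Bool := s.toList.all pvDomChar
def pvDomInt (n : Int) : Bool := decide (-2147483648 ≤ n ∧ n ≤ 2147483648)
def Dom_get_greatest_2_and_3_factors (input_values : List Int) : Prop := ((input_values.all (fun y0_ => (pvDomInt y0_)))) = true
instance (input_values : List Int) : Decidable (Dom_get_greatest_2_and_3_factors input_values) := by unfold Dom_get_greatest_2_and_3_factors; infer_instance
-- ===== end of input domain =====

-- B replaces A's exponent-guessing re-scans of the whole list by a single pass that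
-- takes the running minimum of each element's 2-adic and 3-adic valuation.

-- ===== PORT A =====
/-- A's first loop: collect the absolute values, skipping zeros. -/
def pvAbsVals (input_values : List Int) : List Int :=
  input_values.foldl
    (fun acc e => if e < 0 then acc ++ [-e] else if e > 0 then acc ++ [e] else acc) []

/-- A's `while True` exponent search, step for step; `fuel` only makes Python's
    unbounded loop total (with the fuel A's caller passes it is never exhausted
    when `Pre_` holds; without a nonzero element Python diverges). -/
def pvALoop (p : Int) (vals : List Int) : Nat → Nat → Int
  | 0, k => (k : Int) - 1
  | fuel+1, k =>
    if vals.any (fun elemento => PySem.Int.mod elemento (p ^ k) ≠ 0) then (k : Int) - 1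
    else pvALoop p vals fuel (k + 1)

def get_greatest_2_and_3_factors (input_values : List Int) : Int :=
  let absolute_values := pvAbsVals input_values
  let fuel := (input_values.map Int.natAbs).sum + 2
  let two_factor_exponent := pvALoop 2 absolute_values fuel 0
  let three_factor_exponent := pvALoop 3 absolute_values fuel 0
  -- under Pre_ both exponents are ≥ 0, so `.toNat` is exact
  2 ^ two_factor_exponent.toNat * 3 ^ three_factor_exponent.toNat

-- ===== PORT B =====
/-- B's helper `_val`: the `2 ≤ p` / `a ≠ 0` guards only serve termination;
    B calls it with `p ∈ {2,3}` and `a > 0`, where they never fire early. -/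
def pvVal (p a : Nat) : Nat :=
  if h : 2 ≤ p ∧ a ≠ 0 ∧ a % p = 0 then pvVal p (a / p) + 1 else 0
termination_by a
decreasing_by exact Nat.div_lt_self (Nat.pos_of_ne_zero h.2.1) (by omega)

/-- One iteration of B's loop body. -/
def pvBStep (st : Option Nat × Option Nat) (x : Int) : Option Nat × Option Nat :=
  if x ≠ 0 then
    let a := x.natAbs
    let v2 := pvVal 2 a
    let v3 := pvVal 3 a
    let e2 := match st.1 with | none => v2 | some m => if v2 < m then v2 else m
    let e3 := match st.2 with | none => v3 | some m => if v3 < m then v3 else m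
    (some e2, some e3)
  else st

def get_greatest_2_and_3_factors_alt (input_values : List Int) : Int :=
  match input_values.foldl pvBStep (none, none) with
  | (some e2, some e3) => 2 ^ e2 * 3 ^ e3
  | _ => 0  -- Python B raises TypeError here (no nonzero element); outside Pre_

-- ===== PRECONDITION & SPEC =====
-- Pre_: A diverges (both `while True` loops never exit) when every element is zero
-- or the list is empty; exactly those inputs are excluded.
def Pre_get_greatest_2_and_3_factors (input_values : List Int) : Prop :=
  ∃ x ∈ input_values, x ≠ 0
instance (input_values : List Int) : Decidable (Pre_get_greatest_2_and_3_factors input_values) := by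
  unfold Pre_get_greatest_2_and_3_factors; infer_instance

def pvWitness_get_greatest_2_and_3_factors : List Int := [6, -12, 0]

def Spec_get_greatest_2_and_3_factors (input_values : List Int) (out : Int) : Prop :=
  out = get_greatest_2_and_3_factors_alt input_values
instance (input_values : List Int) (out : Int) : Decidable (Spec_get_greatest_2_and_3_factors input_values out) := by
  unfold Spec_get_greatest_2_and_3_factors; infer_instance

-- ===== CLAIM (what is proved, stated in full; the proofs are below) =====
def Claim_equal_get_greatest_2_and_3_factors : Prop :=
  ∀ (input_values : List Int), Dom_get_greatest_2_and_3_factors input_values →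
    Pre_get_greatest_2_and_3_factors input_values →
    Spec_get_greatest_2_and_3_factors input_values (get_greatest_2_and_3_factors input_values)

-- ===== LEMMAS AND PROOFS =====

/-- Minimum-accumulating step used to describe B's fold componentwise. -/
def pvStep2 (o : Option Nat) (v : Nat) : Option Nat :=
  some (match o with | none => v | some m => if v < m then v else m)

lemma pvAbsVals_aux (xs : List Int) : ∀ acc : List Int,
    xs.foldl (fun acc e => if e < 0 then acc ++ [-e] else if e > 0 then acc ++ [e] else acc) acc
      = acc ++ (xs.filter (fun x => decide (x ≠ 0))).map (fun x => ((x.natAbs : Nat) : Int)) := by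
  induction xs with
  | nil => simp
  | cons x xs ih =>
    intro acc
    simp only [List.foldl_cons, ih, List.filter_cons]
    rcases lt_trichotomy x 0 with h | h | h
    · have hx : ¬ x = 0 := by omega
      simp [h, hx, List.append_assoc, abs_of_neg h]
    · simp [h]
    · have hx : ¬ x = 0 := by omega
      have h2 : ¬ x < 0 := by omega
      simp [h, h2, hx, List.append_assoc, abs_of_pos h]

lemma pvAbsVals_eq (xs : List Int) :
    pvAbsVals xs = ((xs.filter (fun x => decide (x ≠ 0))).map Int.natAbs).map (fun n : Nat => (n : Int)) := by
  rw [pvAbsVals, pvAbsVals_aux, List.nil_append, List.map_map]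
  rfl

lemma pvFoldB (xs : List Int) : ∀ st : Option Nat × Option Nat,
    xs.foldl pvBStep st
      = ((((xs.filter (fun x => decide (x ≠ 0))).map Int.natAbs).map (pvVal 2)).foldl pvStep2 st.1,
         (((xs.filter (fun x => decide (x ≠ 0))).map Int.natAbs).map (pvVal 3)).foldl pvStep2 st.2) := by
  induction xs with
  | nil => intro st; simp
  | cons x xs ih =>
    intro st
    simp only [List.foldl_cons, List.filter_cons]
    by_cases hx : x = 0
    · simp only [hx, decide_true, Bool.not_true, List.filter_cons_of_neg, ih]
      have : pvBStep st 0 = st := by simp [pvBStep]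
      simp [hx, this]
    · simp only [ne_eq, hx, not_false_eq_true, decide_true, Bool.not_false,
        List.filter_cons_of_pos, List.map_cons, List.foldl_cons, ih]
      congr 1 <;> · simp [pvBStep, hx, pvStep2]

lemma pvFoldl_step2_some (L : List Nat) : ∀ m, L.foldl pvStep2 (some m) = some (L.foldl min m) := by
  induction L with
  | nil => intro m; simp
  | cons v L ih =>
    intro m
    have : pvStep2 (some m) v = some (min m v) := by
      simp only [pvStep2]
      rcases Nat.lt_or_ge v m with h | h
      · simp [h, Nat.min_def]
      · have h2 : ¬ v < m := by omega
        simp [h2, Nat.min_def]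
    simp [List.foldl_cons, this, ih]

lemma pvFoldl_min_le (L : List Nat) : ∀ m, L.foldl min m ≤ m ∧ ∀ v ∈ L, L.foldl min m ≤ v := by
  induction L with
  | nil => simp
  | cons v L ih =>
    intro m
    have h := ih (min m v)
    refine ⟨le_trans h.1 (Nat.min_le_left m v), ?_⟩
    intro w hw
    rcases List.mem_cons.mp hw with rfl | hw
    · exact le_trans h.1 (Nat.min_le_right m w)
    · exact h.2 w hw

lemma pvFoldl_min_mem (L : List Nat) : ∀ m, L.foldl min m = m ∨ L.foldl min m ∈ L := by
  induction L with
  | nil => simp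
  | cons v L ih =>
    intro m
    simp only [List.foldl_cons]
    rcases ih (min m v) with h | h
    · by_cases hmv : m ≤ v
      · left; rw [h, Nat.min_def, if_pos hmv]
      · right; rw [h]
        have hv : min m v = v := by omega
        rw [hv]; simp
    · right; exact List.mem_cons_of_mem _ h

lemma pvOmin_spec (L : List Nat) (hL : L ≠ []) :
    ∃ e, L.foldl pvStep2 none = some e ∧ e ∈ L ∧ ∀ v ∈ L, e ≤ v := by
  cases L with
  | nil => exact absurd rfl hL
  | cons v L =>
    refine ⟨L.foldl min v, ?_, ?_, ?_⟩
    · simp [List.foldl_cons, pvStep2, pvFoldl_step2_some]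
    · rcases pvFoldl_min_mem L v with h | h
      · simp [h]
      · simp [h]
    · intro w hw
      rcases List.mem_cons.mp hw with rfl | hw
      · exact (pvFoldl_min_le L w).1
      · exact (pvFoldl_min_le L v).2 w hw

lemma pvVal_dvd_iff (p : Nat) (hp : 2 ≤ p) : ∀ a, a ≠ 0 → ∀ k, (p ^ k ∣ a ↔ k ≤ pvVal p a) := by
  intro a
  induction a using Nat.strong_induction_on with
  | _ a ih =>
    intro ha k
    rw [pvVal]
    by_cases hm : a % p = 0
    · have hp0 : 0 < p := by omega
      have hdvd : p ∣ a := Nat.dvd_of_mod_eq_zero hm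
      have hq : p * (a / p) = a := Nat.mul_div_cancel' hdvd
      have hq0 : a / p ≠ 0 := by
        intro h0; rw [h0, Nat.mul_zero] at hq; exact ha hq.symm
      have hlt : a / p < a := Nat.div_lt_self (Nat.pos_of_ne_zero ha) (by omega)
      rw [dif_pos ⟨hp, ha, hm⟩]
      cases k with
      | zero => simp
      | succ j =>
        have hih := ih (a / p) hlt hq0 j
        constructor
        · intro hd
          have hj : p ^ j ∣ a / p := by
            rcases hd with ⟨c, hc⟩
            refine ⟨c, ?_⟩
            apply Nat.eq_of_mul_eq_mul_left hp0
            rw [hq, hc, pow_succ]; ring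
          have := hih.mp hj
          omega
        · intro hk
          have hj : p ^ j ∣ a / p := hih.mpr (by omega)
          rcases hj with ⟨c, hc⟩
          exact ⟨c, by rw [← hq, hc, pow_succ]; ring⟩
    · rw [dif_neg (by tauto)]
      cases k with
      | zero => simp
      | succ j =>
        simp only [Nat.succ_le_iff]
        constructor
        · intro hd
          exact absurd (Nat.mod_eq_zero_of_dvd (dvd_trans (dvd_pow_self p (Nat.succ_ne_zero j)) hd)) hm
        · omega

lemma pvVal_le (p a : Nat) (hp : 2 ≤ p) (ha : a ≠ 0) : pvVal p a ≤ a := by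
  have hd : p ^ pvVal p a ∣ a := (pvVal_dvd_iff p hp a ha (pvVal p a)).mpr le_rfl
  have h1 : p ^ pvVal p a ≤ a := Nat.le_of_dvd (Nat.pos_of_ne_zero ha) hd
  have h2 : pvVal p a < 2 ^ pvVal p a := Nat.lt_two_pow_self
  have h3 : 2 ^ pvVal p a ≤ p ^ pvVal p a := Nat.pow_le_pow_left hp _
  omega

lemma pvALoop_eq (p : Nat) (hp : 2 ≤ p) (N : List Nat) (hpos : ∀ n ∈ N, n ≠ 0) (e : Nat)
    (hmem : e ∈ N.map (pvVal p)) (hle : ∀ n ∈ N, e ≤ pvVal p n) :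
    ∀ fuel k, k ≤ e + 1 → e + 1 - k < fuel →
      pvALoop (p : Int) (N.map (fun n : Nat => (n : Int))) fuel k = (e : Int) := by
  have hiff : ∀ k : Nat, (∀ n ∈ N, p ^ k ∣ n) ↔ k ≤ e := by
    intro k
    constructor
    · intro h
      rcases List.mem_map.mp hmem with ⟨n0, hn0, he0⟩
      have := (pvVal_dvd_iff p hp n0 (hpos n0 hn0) k).mp (h n0 hn0)
      omega
    · intro hk n hn
      exact (pvVal_dvd_iff p hp n (hpos n hn) k).mpr (le_trans hk (hle n hn))
  have hcond : ∀ k : Nat,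
      ((N.map (fun n : Nat => (n : Int))).any
        (fun elemento => PySem.Int.mod elemento ((p : Int) ^ k) ≠ 0)) = true ↔ ¬ k ≤ e := by
    intro k
    rw [← hiff k]
    simp only [List.any_eq_true, List.mem_map]
    constructor
    · rintro ⟨x, ⟨n, hn, rfl⟩, hx⟩ hall
      have hd : ((p : Int) ^ k) ∣ (n : Int) := by
        have := hall n hn
        exact_mod_cast Int.natCast_dvd_natCast.mpr this
      rw [(PySem.Int.mod_eq_zero_iff_dvd _ _).mpr hd] at hx
      simp at hx
    · intro hnall
      by_contra hno
      push Not at hno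
      apply hnall
      intro n hn
      have hz := hno ((n : Int)) ⟨n, hn, rfl⟩
      have hd : ((p : Int) ^ k) ∣ (n : Int) := by
        simp only [ne_eq, decide_not, Bool.not_eq_eq_eq_not, Bool.not_true,
          decide_eq_false_iff_not, Decidable.not_not] at hz
        exact (PySem.Int.mod_eq_zero_iff_dvd _ _).mp hz
      have hcast : ((p ^ k : Nat) : Int) ∣ (n : Int) := by push_cast; exact hd
      exact_mod_cast hcast
  intro fuel
  induction fuel with
  | zero => intro k h1 h2; omega
  | succ f ihf =>
    intro k h1 h2
    rw [pvALoop]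
    split
    · next h =>
      have hk : ¬ k ≤ e := (hcond k).mp (by simpa using h)
      have : k = e + 1 := by omega
      subst this
      push_cast
      ring
    · next h =>
      have hk : k ≤ e := by
        by_contra hk
        exact h (by simpa using (hcond k).mpr hk)
      exact ihf (k + 1) (by omega) (by omega)

-- ===== VERDICT (by name: the statement is the Claim_ definition above) =====
theorem get_greatest_2_and_3_factors_spec : Claim_equal_get_greatest_2_and_3_factors := by
  intro xs _ hpre
  unfold Spec_get_greatest_2_and_3_factors
  obtain ⟨x0, hx0, hx0ne⟩ := hpre
  have hx0F : x0 ∈ xs.filter (fun x => decide (x ≠ 0)) :=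
    List.mem_filter.mpr ⟨hx0, by simpa using hx0ne⟩
  set N : List Nat := (xs.filter (fun x => decide (x ≠ 0))).map Int.natAbs with hN
  have hNne : N ≠ [] := by
    intro h
    have : x0.natAbs ∈ N := List.mem_map_of_mem hx0F
    rw [h] at this
    simp at this
  have hpos : ∀ n ∈ N, n ≠ 0 := by
    intro n hn
    rcases List.mem_map.mp hn with ⟨x, hxF, rfl⟩
    have hxne : x ≠ 0 := by simpa using (List.mem_filter.mp hxF).2
    simpa using hxne
  obtain ⟨e2, he2eq, he2mem, he2le⟩ :=
    pvOmin_spec (N.map (pvVal 2)) (by simp [hNne])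
  obtain ⟨e3, he3eq, he3mem, he3le⟩ :=
    pvOmin_spec (N.map (pvVal 3)) (by simp [hNne])
  have he2le' : ∀ n ∈ N, e2 ≤ pvVal 2 n := fun n hn => he2le _ (List.mem_map_of_mem hn)
  have he3le' : ∀ n ∈ N, e3 ≤ pvVal 3 n := fun n hn => he3le _ (List.mem_map_of_mem hn)
  have hB : get_greatest_2_and_3_factors_alt xs = 2 ^ e2 * 3 ^ e3 := by
    unfold get_greatest_2_and_3_factors_alt
    rw [pvFoldB]
    rw [← hN] at *
    simp only [he2eq, he3eq]
  -- every element of N is at most the total sum of absolute values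
  have hsum : ∀ n ∈ N, n ≤ (xs.map Int.natAbs).sum := by
    intro n hn
    rcases List.mem_map.mp hn with ⟨x, hxF, rfl⟩
    exact List.single_le_sum (fun _ _ => Nat.zero_le _) _
      (List.mem_map_of_mem (List.mem_of_mem_filter hxF))
  have he2sum : e2 ≤ (xs.map Int.natAbs).sum := by
    rcases List.mem_map.mp he2mem with ⟨n, hn, rfl⟩
    exact le_trans (pvVal_le 2 n (by norm_num) (hpos n hn)) (hsum n hn)
  have he3sum : e3 ≤ (xs.map Int.natAbs).sum := by
    rcases List.mem_map.mp he3mem with ⟨n, hn, rfl⟩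
    exact le_trans (pvVal_le 3 n (by norm_num) (hpos n hn)) (hsum n hn)
  have hA : get_greatest_2_and_3_factors xs = 2 ^ e2 * 3 ^ e3 := by
    unfold get_greatest_2_and_3_factors
    have habs : pvAbsVals xs = N.map (fun n : Nat => (n : Int)) := by
      rw [pvAbsVals_eq, ← hN]
    have h2 := pvALoop_eq 2 (by norm_num) N hpos e2 he2mem he2le'
      ((xs.map Int.natAbs).sum + 2) 0 (by omega) (by omega)
    have h3 := pvALoop_eq 3 (by norm_num) N hpos e3 he3mem he3le'
      ((xs.map Int.natAbs).sum + 2) 0 (by omega) (by omega)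
    push_cast at h2 h3
    simp only [habs, h2, h3, Int.toNat_natCast]
  rw [hA, hB]
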